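-- pv_equiv track=rewrite | github.com/MattiaMontis/Python-university-exercises | Python Projects/Mastering Python/Decifrazione tramite ricorsione/2-Algoritmo.py | find_quasi_anagrams
-- ===== SOURCE A (Python) =====
-- def is_quasi_anagram(original_word, other_word):
--     # Verifica se 'other_word' è un "quasi-anagramma" di 'original_word'.
--     # Un quasi-anagramma è una parola che può essere formata da un anagramma di 'original_word'
--     # con un solo carattere extra.
--     if len(original_word) + 1 != len(other_word):  # La lunghezza deve essere +1
--         return False
--     for letter in original_word:
--         if letter not in other_word:  # Verifica che ogni lettera di 'original_word' sia in 'other_word'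
--             return False
--         other_word = other_word.replace(letter, '', 1)  # Rimuove una copia della lettera trovata
--     if len(other_word) == 1:  # Se rimane un solo carattere extra, è un quasi-anagramma
--         return True
--     return False
--
-- def find_quasi_anagrams(encrypted_text, original_word):
--     # Trova tutte le occorrenze di "quasi-anagrammi" di 'original_word' nel testo
--     indexes = []
--     for i in range(len(encrypted_text)):
--         for j in range(i + 1, len(encrypted_text) + 1):  # Itera su tutte le sottosequenze
--             current_word = encrypted_text[i:j]
--             if is_quasi_anagram(original_word, current_word):  # Verifica se è un quasi-anagramma
--                 indexes.append((i, j))  # Memorizza gli indici dove si trova la sottosequenza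
--     return indexes
-- ===== SOURCE B (Python) =====
-- def _counts(s):
--     d = {}
--     for c in s:
--         d[c] = d.get(c, 0) + 1
--     return d
--
-- def find_quasi_anagrams(encrypted_text, original_word):
--     # Only windows of length len(original_word)+1 can be quasi-anagrams:
--     # compare character counts of each such window against the word's counts.
--     size = len(original_word) + 1
--     need = _counts(original_word)
--     result = []
--     for i in range(len(encrypted_text) - size + 1):
--         window = _counts(encrypted_text[i:i + size])
--         if all(window.get(c, 0) >= k for c, k in need.items()):
--             result.append((i, i + size))
--     return result
-- ===== Notes on version B (the rewrite author's own statement) =====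
-- stated objective: faster
-- what changed: Instead of testing every substring s[i:j] with a quadratic double loop plus removal-based anagram checking, B only examines the n windows of the single feasible length len(word)+1 and compares character-frequency dictionaries.
import Mathlib
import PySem

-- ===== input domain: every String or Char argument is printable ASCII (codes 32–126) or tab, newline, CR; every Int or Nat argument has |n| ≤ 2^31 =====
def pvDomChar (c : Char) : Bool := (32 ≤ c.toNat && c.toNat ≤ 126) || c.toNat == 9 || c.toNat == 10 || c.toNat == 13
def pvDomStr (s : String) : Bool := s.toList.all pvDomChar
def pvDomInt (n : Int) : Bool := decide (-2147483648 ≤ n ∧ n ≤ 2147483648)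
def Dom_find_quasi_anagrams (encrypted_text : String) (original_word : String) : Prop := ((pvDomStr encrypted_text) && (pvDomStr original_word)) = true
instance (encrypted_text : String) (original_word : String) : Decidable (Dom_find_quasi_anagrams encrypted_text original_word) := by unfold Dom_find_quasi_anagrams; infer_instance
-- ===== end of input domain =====

-- B replaces A's scan of all substrings by a frequency-count check of the windows of the
-- single feasible length len(original_word)+1 (objective: faster).

-- ===== PORT A =====
-- the 'for letter in original_word' loop of is_quasi_anagram: the early 'return False' is `none`;
-- `letter in other_word` for a single char is char membership, and replace(letter,'',1) is List.erase
def pvQALoop : List Char → List Char → Option (List Char)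
  | [], other => some other
  | letter :: rest, other =>
      if letter ∈ other then pvQALoop rest (other.erase letter) else none

def is_quasi_anagram (original_word : String) (other_word : String) : Bool :=
  if PySem.Str.len original_word + 1 ≠ PySem.Str.len other_word then false
  else
    match pvQALoop original_word.toList other_word.toList with
    | none => false
    | some rem => if rem.length = 1 then true else false

def find_quasi_anagrams (encrypted_text : String) (original_word : String) : List (List Int) :=
  (PySem.List.pyRange 0 (PySem.Str.len encrypted_text)).foldl
    (fun indexes i =>
      (PySem.List.pyRange (i + 1) (PySem.Str.len encrypted_text + 1)).foldl
        (fun indexes j =>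
          if is_quasi_anagram original_word (PySem.Str.slice encrypted_text (some i) (some j))
          then indexes ++ [[i, j]] else indexes)
        indexes)
    []

-- ===== PORT B =====
-- Source B's _counts: dict of character frequencies
def pvCounts (s : List Char) : PySem.Dict Char Int :=
  s.foldl (fun d c => d.insert c (d.getD c 0 + 1)) PySem.Dict.empty

def find_quasi_anagrams_alt (encrypted_text : String) (original_word : String) : List (List Int) :=
  let size := PySem.Str.len original_word + 1
  let need := pvCounts original_word.toList
  (PySem.List.pyRange 0 (PySem.Str.len encrypted_text - size + 1)).foldl
    (fun result i =>
      let window := pvCounts (PySem.Str.slice encrypted_text (some i) (some (i + size))).toList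
      if need.items.all (fun ck => decide (ck.2 ≤ window.getD ck.1 0))
      then result ++ [[i, i + size]] else result)
    []

-- ===== PRECONDITION & SPEC =====
def Spec_find_quasi_anagrams (encrypted_text : String) (original_word : String) (out : List (List Int)) : Prop := out = find_quasi_anagrams_alt encrypted_text original_word
instance (encrypted_text : String) (original_word : String) (out : List (List Int)) : Decidable (Spec_find_quasi_anagrams encrypted_text original_word out) := by unfold Spec_find_quasi_anagrams; infer_instance

-- ===== CLAIM (what is proved, stated in full; the proofs are below) =====
def Claim_equal_find_quasi_anagrams : Prop := ∀ (encrypted_text : String) (original_word : String), Dom_find_quasi_anagrams encrypted_text original_word → Spec_find_quasi_anagrams encrypted_text original_word (find_quasi_anagrams encrypted_text original_word)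

-- ===== LEMMAS AND PROOFS =====

-- A's removal loop succeeds exactly when every character count of w is covered by `other`
theorem pvQALoop_isSome_iff (w : List Char) : ∀ other : List Char,
    (pvQALoop w other).isSome = true ↔ ∀ c : Char, w.count c ≤ other.count c := by
  induction w with
  | nil => intro other; simp [pvQALoop]
  | cons letter rest ih =>
      intro other
      simp only [pvQALoop]
      by_cases hm : letter ∈ other
      · rw [if_pos hm, ih]
        have hpos : 0 < other.count letter := List.count_pos_iff.mpr hm
        constructor
        · intro h c
          have hc := h c
          rw [List.count_erase] at hc
          rw [List.count_cons]
          by_cases hcl : c = letter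
          · subst hcl; simp at hc ⊢; omega
          · have hb : (letter == c) = false := by simp [Ne.symm hcl]
            rw [hb] at hc ⊢; simp at hc ⊢; omega
        · intro h c
          have hc := h c
          rw [List.count_cons] at hc
          rw [List.count_erase]
          by_cases hcl : c = letter
          · subst hcl; simp at hc ⊢; omega
          · have hb : (letter == c) = false := by simp [Ne.symm hcl]
            rw [hb] at hc ⊢; simp at hc ⊢; omega
      · rw [if_neg hm]
        simp only [Option.isSome_none]
        constructor
        · intro h; exact absurd h (by simp)
        · intro h
          exfalso
          have hc := h letter
          rw [List.count_cons] at hc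
          have h0 : other.count letter = 0 := by rw [List.count_eq_zero]; exact hm
          simp [h0] at hc

-- each successful removal step shortens `other` by exactly one character
theorem pvQALoop_length (w : List Char) : ∀ other rem : List Char,
    pvQALoop w other = some rem → rem.length + w.length = other.length := by
  induction w with
  | nil =>
      intro other rem h
      simp [pvQALoop] at h
      simp [h]
  | cons letter rest ih =>
      intro other rem h
      simp only [pvQALoop] at h
      by_cases hm : letter ∈ other
      · rw [if_pos hm] at h
        have := ih (other.erase letter) rem h
        have hl : (other.erase letter).length = other.length - 1 := by
          simp [hm]
        have hpos : 0 < other.length := List.length_pos_of_mem hm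
        simp only [List.length_cons]
        omega
      · rw [if_neg hm] at h; exact absurd h (by simp)

-- A's per-substring test, characterized by length and character counts
theorem is_quasi_anagram_iff (ow sub : String) :
    is_quasi_anagram ow sub = true ↔
      sub.toList.length = ow.toList.length + 1 ∧
        ∀ c : Char, ow.toList.count c ≤ sub.toList.count c := by
  unfold is_quasi_anagram
  rw [PySem.Str.len_eq, PySem.Str.len_eq]
  by_cases hlen : sub.toList.length = ow.toList.length + 1
  · rw [if_neg (by omega)]
    cases hq : pvQALoop ow.toList sub.toList with
    | none =>
        simp only [hlen, true_and]
        constructor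
        · intro h; exact absurd h (by simp)
        · intro h
          have := (pvQALoop_isSome_iff ow.toList sub.toList).mpr h
          rw [hq] at this; exact absurd this (by simp)
    | some rem =>
        have hr := pvQALoop_length ow.toList sub.toList rem hq
        have hr1 : rem.length = 1 := by omega
        simp only [hr1, hlen, true_and, if_pos]
        constructor
        · intro _
          exact (pvQALoop_isSome_iff ow.toList sub.toList).mp (by rw [hq]; rfl)
        · intro _; trivial
  · rw [if_pos (by omega)]
    constructor
    · intro h; exact absurd h (by simp)
    · intro h; exact absurd h.1 hlen

-- B's per-window test, characterized by character counts
theorem pvCounts_test_iff (w sub : List Char) :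
    ((pvCounts w).items.all (fun ck => decide (ck.2 ≤ (pvCounts sub).getD ck.1 0)) = true) ↔
      ∀ c : Char, w.count c ≤ sub.count c := by
  unfold pvCounts
  rw [PySem.Dict.foldl_insert_getD_add_one_eq_counter,
      PySem.Dict.foldl_insert_getD_add_one_eq_counter,
      PySem.Dict.items_counter]
  simp only [List.all_eq_true, List.mem_map]
  constructor
  · intro h c
    by_cases hc : c ∈ w
    · have := h (c, (w.count c : Int)) ⟨c, (PySem.Set.mem_ofList w c).mpr hc, rfl⟩
      rw [PySem.Dict.getD_counter] at this
      have h2 := of_decide_eq_true this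
      dsimp only at h2
      exact_mod_cast h2
    · simp [List.count_eq_zero_of_not_mem hc]
  · rintro h ck ⟨c, _, rfl⟩
    rw [PySem.Dict.getD_counter]
    apply decide_eq_true
    show ((w.count c : Int)) ≤ (sub.count c : Int)
    exact_mod_cast h c

-- filter of a duplicate-free list whose predicate forces a single value
theorem pvFilter_single {l : List Int} {p : Int → Bool} {j0 : Int}
    (hnd : l.Nodup) (h : ∀ j ∈ l, p j = true → j = j0) :
    l.filter p = if j0 ∈ l ∧ p j0 = true then [j0] else [] := by
  induction l with
  | nil => simp
  | cons x t ih =>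
      have hndt := (List.nodup_cons.mp hnd).2
      have hxt := (List.nodup_cons.mp hnd).1
      cases hp : p x with
      | true =>
          have hx : x = j0 := h x (by simp) hp
          subst hx
          have ht : t.filter p = [] := by
            rw [List.filter_eq_nil_iff]
            intro j hj hpj
            exact absurd (h j (by simp [hj]) hpj ▸ hj) hxt
          rw [List.filter_cons_of_pos hp, ht, if_pos ⟨by simp, hp⟩]
      | false =>
          have hrec := ih hndt (fun j hj hpj => h j (by simp [hj]) hpj)
          rw [List.filter_cons_of_neg (by simp [hp]), hrec]
          by_cases hj0 : j0 ∈ t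
          · simp [hj0]
          · rw [if_neg (fun hc => hj0 hc.1), if_neg ?_]
            rintro ⟨hm', hp'⟩
            rcases List.mem_cons.mp hm' with rfl | hmt
            · rw [hp] at hp'; exact Bool.false_ne_true hp'
            · exact hj0 hmt

theorem pvFlatMap_congr {α β : Type} {l : List α} {f g : α → List β}
    (h : ∀ x ∈ l, f x = g x) : l.flatMap f = l.flatMap g := by
  induction l with
  | nil => rfl
  | cons x t ih =>
      simp only [List.flatMap_cons]
      rw [h x (by simp), ih (fun y hy => h y (by simp [hy]))]

theorem pvMapFilter {α β : Type} (l : List α) (p : α → Bool) (f : α → β) :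
    (l.filter p).map f = l.flatMap (fun x => if p x = true then [f x] else []) := by
  induction l with
  | nil => rfl
  | cons x t ih =>
      cases hp : p x with
      | true => simp [hp, ih]
      | false => simp [hp, ih]

-- the slice s[i:j] for 0 ≤ i ≤ j ≤ n has length j - i
theorem pvSliceLen (s : List Char) {i j : Int} (hi : 0 ≤ i) (hij : i ≤ j)
    (hj : j ≤ (s.length : Int)) :
    ((PySem.List.slice s (some i) (some j)).length : Int) = j - i := by
  rw [PySem.List.slice_of_nonneg s hi (by omega) (by omega) hj]
  simp only [List.length_take, List.length_drop]
  omega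

theorem find_quasi_anagrams_eq (encrypted_text original_word : String) :
    find_quasi_anagrams encrypted_text original_word
      = find_quasi_anagrams_alt encrypted_text original_word := by
  unfold find_quasi_anagrams find_quasi_anagrams_alt
  dsimp only
  simp only [PySem.Str.len_eq]
  -- abbreviations used below: n = len(encrypted_text), L = len(original_word), both as Int
  have hn0 : (0 : Int) ≤ (encrypted_text.toList.length : Int) := by positivity
  have hL0 : (0 : Int) ≤ (original_word.toList.length : Int) := by positivity
  -- A's inner loop is an append of a filtered, mapped range
  have hA : ∀ (acc : List (List Int)) (i : Int),
      (PySem.List.pyRange (i + 1) ((encrypted_text.toList.length : Int) + 1)).foldl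
        (fun indexes j =>
          if is_quasi_anagram original_word (PySem.Str.slice encrypted_text (some i) (some j))
          then indexes ++ [[i, j]] else indexes) acc
      = acc ++ ((PySem.List.pyRange (i + 1) ((encrypted_text.toList.length : Int) + 1)).filter
          (fun j => is_quasi_anagram original_word
            (PySem.Str.slice encrypted_text (some i) (some j)))).map (fun j => [i, j]) := by
    intro acc i
    exact PySem.List.foldl_append_if _ _ _ _
  simp only [hA]
  rw [PySem.List.foldl_append_eq_flatMap]
  have hB : ∀ (acc : List (List Int)) (l : List Int),
      l.foldl
        (fun result i =>
          if (pvCounts original_word.toList).items.all (fun ck => decide (ck.2 ≤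
              (pvCounts (PySem.Str.slice encrypted_text (some i)
                (some (i + ((original_word.toList.length : Int) + 1)))).toList).getD ck.1 0))
          then result ++ [[i, i + ((original_word.toList.length : Int) + 1)]] else result) acc
      = acc ++ (l.filter
          (fun i => (pvCounts original_word.toList).items.all (fun ck => decide (ck.2 ≤
              (pvCounts (PySem.Str.slice encrypted_text (some i)
                (some (i + ((original_word.toList.length : Int) + 1)))).toList).getD ck.1 0)))).map
          (fun i => [i, i + ((original_word.toList.length : Int) + 1)]) := by
    intro acc l
    exact PySem.List.foldl_append_if _ _ _ _
  simp only [List.nil_append]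
  refine Eq.trans ?_ (Eq.trans (hB [] _) (List.nil_append _)).symm
  -- split A's outer range at m = max 0 (n - L): beyond m no window fits
  set m : Int := max 0 ((encrypted_text.toList.length : Int) - (original_word.toList.length : Int)) with hm
  have hmL : (encrypted_text.toList.length : Int) - (original_word.toList.length : Int) ≤ m := le_max_right _ _
  have hm0 : 0 ≤ m := le_max_left _ _
  have hmn : m ≤ (encrypted_text.toList.length : Int) := by omega
  rw [PySem.List.pyRange_one_append 0 m (encrypted_text.toList.length : Int) hm0 hmn,
      List.flatMap_append]
  have htail : (PySem.List.pyRange m (encrypted_text.toList.length : Int)).flatMap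
      (fun i => ((PySem.List.pyRange (i + 1) ((encrypted_text.toList.length : Int) + 1)).filter
        (fun j => is_quasi_anagram original_word
          (PySem.Str.slice encrypted_text (some i) (some j)))).map (fun j => [i, j])) = [] := by
    rw [List.flatMap_eq_nil_iff]
    intro i hi
    rw [PySem.List.mem_pyRange_one] at hi
    have hfil : (PySem.List.pyRange (i + 1) ((encrypted_text.toList.length : Int) + 1)).filter
        (fun j => is_quasi_anagram original_word
          (PySem.Str.slice encrypted_text (some i) (some j))) = [] := by
      rw [List.filter_eq_nil_iff]
      intro j hj hp
      rw [PySem.List.mem_pyRange_one] at hj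
      have hqa := (is_quasi_anagram_iff original_word
        (PySem.Str.slice encrypted_text (some i) (some j))).mp hp
      rw [PySem.Str.toList_slice] at hqa
      have hlen : ((PySem.Chars.slice encrypted_text.toList (some i) (some j)).length : Int) = j - i :=
        pvSliceLen encrypted_text.toList (by omega) (by omega) (by omega)
      have h1 := hqa.1
      omega
    rw [hfil]
    rfl
  rw [htail, List.append_nil]
  -- B's range is exactly pyRange 0 m
  have hrange : PySem.List.pyRange 0
        ((encrypted_text.toList.length : Int) - ((original_word.toList.length : Int) + 1) + 1)
      = PySem.List.pyRange 0 m := by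
    by_cases hc : (encrypted_text.toList.length : Int) - (original_word.toList.length : Int) ≤ 0
    · rw [PySem.List.pyRange_one_eq_nil (by omega), PySem.List.pyRange_one_eq_nil (by omega)]
    · have h2 : m = (encrypted_text.toList.length : Int) - (original_word.toList.length : Int) := by omega
      rw [h2]; congr 1; omega
  rw [hrange, pvMapFilter]
  -- pointwise equality on [0, m)
  apply pvFlatMap_congr
  intro i hi
  rw [PySem.List.mem_pyRange_one] at hi
  have him : i < (encrypted_text.toList.length : Int) - (original_word.toList.length : Int) := by omega
  have hsingle := pvFilter_single
    (l := PySem.List.pyRange (i + 1) ((encrypted_text.toList.length : Int) + 1))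
    (p := fun j => is_quasi_anagram original_word
      (PySem.Str.slice encrypted_text (some i) (some j)))
    (j0 := i + ((original_word.toList.length : Int) + 1))
    (PySem.List.nodup_pyRange_one _ _)
    (by
      intro j hj hp
      rw [PySem.List.mem_pyRange_one] at hj
      have hqa := (is_quasi_anagram_iff original_word
        (PySem.Str.slice encrypted_text (some i) (some j))).mp hp
      rw [PySem.Str.toList_slice] at hqa
      have hlen : ((PySem.Chars.slice encrypted_text.toList (some i) (some j)).length : Int) = j - i :=
        pvSliceLen encrypted_text.toList (by omega) (by omega) (by omega)
      have h1 := hqa.1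
      omega)
  simp only [hsingle]
  have hmem : i + ((original_word.toList.length : Int) + 1)
      ∈ PySem.List.pyRange (i + 1) ((encrypted_text.toList.length : Int) + 1) := by
    rw [PySem.List.mem_pyRange_one]; omega
  have hlenw : ((PySem.Chars.slice encrypted_text.toList (some i)
        (some (i + ((original_word.toList.length : Int) + 1)))).length : Int)
      = (i + ((original_word.toList.length : Int) + 1)) - i :=
    pvSliceLen encrypted_text.toList (by omega) (by omega) (by omega)
  -- the two window tests agree on a window of length L+1
  have htest : is_quasi_anagram original_word
        (PySem.Str.slice encrypted_text (some i) (some (i + ((original_word.toList.length : Int) + 1))))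
      = (pvCounts original_word.toList).items.all (fun ck => decide (ck.2 ≤
          (pvCounts (PySem.Str.slice encrypted_text (some i)
            (some (i + ((original_word.toList.length : Int) + 1)))).toList).getD ck.1 0)) := by
    have hiff := is_quasi_anagram_iff original_word
      (PySem.Str.slice encrypted_text (some i) (some (i + ((original_word.toList.length : Int) + 1))))
    have hiffB := pvCounts_test_iff original_word.toList
      (PySem.Str.slice encrypted_text (some i)
        (some (i + ((original_word.toList.length : Int) + 1)))).toList
    rw [PySem.Str.toList_slice] at hiff
    rcases Bool.eq_false_or_eq_true (is_quasi_anagram original_word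
        (PySem.Str.slice encrypted_text (some i)
          (some (i + ((original_word.toList.length : Int) + 1))))) with hb | hb
    · rw [hb]
      rw [hiff] at hb
      have hcnt : ∀ c : Char, original_word.toList.count c ≤
          (PySem.Str.slice encrypted_text (some i)
            (some (i + ((original_word.toList.length : Int) + 1)))).toList.count c := by
        intro c
        rw [PySem.Str.toList_slice]
        exact hb.2 c
      exact (hiffB.mpr hcnt).symm
    · rw [hb]
      rcases Bool.eq_false_or_eq_true ((pvCounts original_word.toList).items.all (fun ck =>
          decide (ck.2 ≤ (pvCounts (PySem.Str.slice encrypted_text (some i)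
            (some (i + ((original_word.toList.length : Int) + 1)))).toList).getD ck.1 0))) with hb2 | hb2
      · exfalso
        rw [Bool.eq_false_iff] at hb
        apply hb
        rw [hiff]
        refine ⟨by omega, ?_⟩
        have hcnt := hiffB.mp hb2
        intro c
        have := hcnt c
        rw [PySem.Str.toList_slice] at this
        exact this
      · rw [hb2]
  rw [← htest]
  rcases Bool.eq_false_or_eq_true (is_quasi_anagram original_word
      (PySem.Str.slice encrypted_text (some i)
        (some (i + ((original_word.toList.length : Int) + 1))))) with hb | hb
  · rw [if_pos ⟨hmem, hb⟩, if_pos hb]; rfl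
  · rw [if_neg (fun hc => (ne_true_of_eq_false hb) hc.2), if_neg (ne_true_of_eq_false hb)]; rfl

-- ===== VERDICT (by name: the statement is the Claim_ definition above) =====
theorem find_quasi_anagrams_spec : Claim_equal_find_quasi_anagrams := by
  intro encrypted_text original_word _
  unfold Spec_find_quasi_anagrams
  exact find_quasi_anagrams_eq encrypted_text original_word
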